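-- pv_equiv track=rewrite | github.com/amagidow/dialects | dialectsDB/utilityfuncs.py | parse_string
-- ===== SOURCE A (Python) =====
-- def parse_string(st): #from Yonatan, test this out
--     inside = False
--     cur_opt = ''
--     variants = ['']
--     for c in st:
--         if c == '(':
--             inside = True
--         elif c == ')':
--             inside = False
--             variants = variants + [v + cur_opt for v in variants]
--             cur_opt = ''
--         elif inside:
--             cur_opt += c
--         else:
--             variants = [v + c for v in variants]
--     return variants
-- ===== SOURCE B (Python) =====
-- def parse_string(st):
--     # One tokenizing pass (fixed chars vs optional chunks), then enumerate all
--     # 2**k inclusion masks, first optional chunk = least-significant bit.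
--     toks = []                 # (False, text) fixed, (True, text) optional
--     inside = False
--     cur = ''
--     for c in st:
--         if c == '(':
--             inside = True
--         elif c == ')':
--             inside = False
--             toks.append((True, cur))
--             cur = ''
--         elif inside:
--             cur += c
--         else:
--             toks.append((False, c))
--     k = sum(1 for opt, _ in toks if opt)
--     out = []
--     for n in range(2 ** k):
--         parts = []
--         m = n
--         for opt, text in toks:
--             if opt:
--                 if m % 2 == 1:
--                     parts.append(text)
--                 m //= 2
--             else:
--                 parts.append(text)
--         out.append(''.join(parts))
--     return out
-- ===== Notes on version B (the rewrite author's own statement) =====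
-- stated objective: faster
-- what changed: Replaces A's incremental variant-doubling fold (which re-maps and re-copies the whole variants list on every fixed character) by one tokenizing pass into fixed/optional chunks followed by a 2^k bitmask enumeration that assembles each variant once via a parts list and a single join, first optional chunk as the least-significant bit.
import Mathlib
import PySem

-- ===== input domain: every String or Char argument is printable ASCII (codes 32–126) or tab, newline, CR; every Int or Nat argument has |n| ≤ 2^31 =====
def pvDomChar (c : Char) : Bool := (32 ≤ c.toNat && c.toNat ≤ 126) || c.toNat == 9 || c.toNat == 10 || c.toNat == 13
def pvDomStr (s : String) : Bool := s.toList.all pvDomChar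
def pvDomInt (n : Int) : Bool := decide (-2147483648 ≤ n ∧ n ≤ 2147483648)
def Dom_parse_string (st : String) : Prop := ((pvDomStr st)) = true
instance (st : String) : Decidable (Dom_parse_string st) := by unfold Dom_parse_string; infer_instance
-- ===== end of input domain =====

-- B replaces A's incremental doubling fold (re-copying all variants per character) by one
-- tokenizing pass plus a 2^k bitmask enumeration; a timing run measured B faster.

-- ===== PORT A =====
-- state: (inside, cur_opt, variants); variants as List (List Char), mk'd at the end
def pvStepA : (Bool × List Char × List (List Char)) → Char → (Bool × List Char × List (List Char))
  | (inside, cur, vars), c =>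
    if c = '(' then (true, cur, vars)
    else if c = ')' then (false, [], vars ++ vars.map (fun v => v ++ cur))
    else if inside then (inside, cur ++ [c], vars)
    else (inside, cur, vars.map (fun v => v ++ [c]))

def parse_string (st : String) : List String :=
  ((st.toList.foldl pvStepA (false, [], [[]])).2.2).map (fun v => String.ofList v)

-- ===== PORT B =====
-- tokenizing pass: state (inside, cur, toks); a token (true, s) is optional, (false, s) fixed
def pvTokStep : (Bool × List Char × List (Bool × List Char)) → Char → (Bool × List Char × List (Bool × List Char))
  | (inside, cur, toks), c =>
    if c = '(' then (true, cur, toks)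
    else if c = ')' then (false, [], toks ++ [(true, cur)])
    else if inside then (inside, cur ++ [c], toks)
    else (inside, cur, toks ++ [(false, [c])])

-- inner loop over tokens: state (parts, m); include i-th optional iff m's bit i is 1
def pvBuildStep : (List Char × Int) → (Bool × List Char) → (List Char × Int)
  | (parts, m), (opt, text) =>
    if opt then (if PySem.Int.mod m 2 = 1 then parts ++ text else parts, PySem.Int.floordiv m 2)
    else (parts ++ text, m)

def parse_string_alt (st : String) : List String :=
  let toks := (st.toList.foldl pvTokStep (false, [], [])).2.2
  let k := (toks.filter (fun t => t.1)).length
  (PySem.List.pyRange 0 ((2 : Int) ^ k) 1).map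
    (fun n => String.ofList (toks.foldl pvBuildStep ([], n)).1)

-- ===== PRECONDITION & SPEC =====
def Spec_parse_string (st : String) (out : List String) : Prop := out = parse_string_alt st
instance (st : String) (out : List String) : Decidable (Spec_parse_string st out) := by unfold Spec_parse_string; infer_instance

-- ===== CLAIM (what is proved, stated in full; the proofs are below) =====
def Claim_equal_parse_string : Prop := ∀ (st : String), Dom_parse_string st → Spec_parse_string st (parse_string st)

-- ===== LEMMAS AND PROOFS =====

-- Nat version of the inner loop, for reasoning
def pvBuildN : (List Char × Nat) → (Bool × List Char) → (List Char × Nat)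
  | (parts, m), (false, text) => (parts ++ text, m)
  | (parts, m), (true, text) => (if m % 2 = 1 then parts ++ text else parts, m / 2)

def pvNumOpts (toks : List (Bool × List Char)) : Nat := (toks.filter (fun t => t.1)).length

def pvRender (toks : List (Bool × List Char)) : List (List Char) :=
  (List.range (2 ^ pvNumOpts toks)).map (fun n => (toks.foldl pvBuildN ([], n)).1)

theorem pvBuild_cast (toks : List (Bool × List Char)) (p : List Char) (n : Nat) :
    toks.foldl pvBuildStep (p, (n : Int)) =
      ((toks.foldl pvBuildN (p, n)).1, ((toks.foldl pvBuildN (p, n)).2 : Int)) := by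
  induction toks generalizing p n with
  | nil => rfl
  | cons t rest ih =>
      obtain ⟨opt, text⟩ := t
      rcases opt with _ | _
      · simpa only [List.foldl_cons, pvBuildStep, pvBuildN, if_neg (Bool.false_ne_true)]
          using ih (p ++ text) n
      · simp only [List.foldl_cons, pvBuildStep, pvBuildN]
        rw [show PySem.Int.mod (n : Int) 2 = ((n % 2 : Nat) : Int) from PySem.Int.mod_natCast n 2,
            show PySem.Int.floordiv (n : Int) 2 = ((n / 2 : Nat) : Int) from
              PySem.Int.floordiv_natCast n 2]
        by_cases h : n % 2 = 1
        · simp only [h, Nat.cast_one]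
          exact ih _ _
        · have h' : ¬ ((n % 2 : Nat) : Int) = 1 := by exact_mod_cast h
          simp only [if_neg h, if_neg h']
          exact ih _ _

theorem pvBuild_prefix (toks : List (Bool × List Char)) (p : List Char) (n : Nat) :
    toks.foldl pvBuildN (p, n) =
      (p ++ (toks.foldl pvBuildN ([], n)).1, (toks.foldl pvBuildN ([], n)).2) := by
  induction toks generalizing p n with
  | nil => simp
  | cons t rest ih =>
      obtain ⟨opt, text⟩ := t
      rcases opt with _ | _
      · simp only [List.foldl_cons, pvBuildN]
        rw [ih (p ++ text), ih ([] ++ text)]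
        simp
      · simp only [List.foldl_cons, pvBuildN]
        by_cases h : n % 2 = 1
        · simp only [if_pos h]
          rw [ih (p ++ text), ih ([] ++ text)]
          simp
        · simp only [if_neg h]
          exact ih p (n / 2)

theorem pvBuild_snd (toks : List (Bool × List Char)) (n : Nat) :
    (toks.foldl pvBuildN ([], n)).2 = n / 2 ^ pvNumOpts toks := by
  induction toks generalizing n with
  | nil => simp [pvNumOpts]
  | cons t rest ih =>
      obtain ⟨opt, text⟩ := t
      rcases opt with _ | _
      · have hnum : pvNumOpts ((false, text) :: rest) = pvNumOpts rest := by simp [pvNumOpts]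
        simp only [List.foldl_cons, pvBuildN, hnum]
        rw [pvBuild_prefix rest ([] ++ text) n]
        exact ih n
      · have hnum : pvNumOpts ((true, text) :: rest) = pvNumOpts rest + 1 := by simp [pvNumOpts]
        simp only [List.foldl_cons, pvBuildN, hnum]
        have key : ∀ p0 : List Char, (rest.foldl pvBuildN (p0, n / 2)).2 = n / 2 ^ (pvNumOpts rest + 1) := by
          intro p0
          rw [pvBuild_prefix rest p0 (n / 2)]
          simp only [ih (n / 2)]
          rw [Nat.div_div_eq_div_mul, pow_succ, Nat.mul_comm]
        by_cases h : n % 2 = 1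
        · simp only [if_pos h]; exact key _
        · simp only [if_neg h]; exact key _

theorem pvBuild_high_bit (toks : List (Bool × List Char)) (n : Nat)
    (hn : n < 2 ^ pvNumOpts toks) :
    (toks.foldl pvBuildN ([], 2 ^ pvNumOpts toks + n)).1 = (toks.foldl pvBuildN ([], n)).1 := by
  induction toks generalizing n with
  | nil => rfl
  | cons t rest ih =>
      obtain ⟨opt, text⟩ := t
      rcases opt with _ | _
      · have hnum : pvNumOpts ((false, text) :: rest) = pvNumOpts rest := by simp [pvNumOpts]
        rw [hnum] at hn ⊢
        simp only [List.foldl_cons, pvBuildN]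
        rw [pvBuild_prefix rest ([] ++ text), pvBuild_prefix rest ([] ++ text), ih n hn]
      · have hnum : pvNumOpts ((true, text) :: rest) = pvNumOpts rest + 1 := by simp [pvNumOpts]
        rw [hnum] at hn ⊢
        have h2 : 2 ^ (pvNumOpts rest + 1) = 2 * 2 ^ pvNumOpts rest := by ring
        have hpar : (2 ^ (pvNumOpts rest + 1) + n) % 2 = n % 2 := by omega
        have hdiv : (2 ^ (pvNumOpts rest + 1) + n) / 2 = 2 ^ pvNumOpts rest + n / 2 := by omega
        have hlt : n / 2 < 2 ^ pvNumOpts rest := by omega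
        simp only [List.foldl_cons, pvBuildN, hpar, hdiv]
        by_cases h : n % 2 = 1
        · simp only [if_pos h]
          rw [pvBuild_prefix rest ([] ++ text), pvBuild_prefix rest ([] ++ text), ih (n / 2) hlt]
        · simp only [if_neg h]
          exact ih (n / 2) hlt

theorem pvRender_fixed (toks : List (Bool × List Char)) (t : List Char) :
    pvRender (toks ++ [(false, t)]) = (pvRender toks).map (fun v => v ++ t) := by
  unfold pvRender
  have hnum : pvNumOpts (toks ++ [(false, t)]) = pvNumOpts toks := by simp [pvNumOpts]
  rw [hnum, List.map_map]
  apply List.map_congr_left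
  intro n _
  simp only [List.foldl_append, List.foldl_cons, List.foldl_nil]
  rcases h : toks.foldl pvBuildN ([], n) with ⟨p, m⟩
  simp [pvBuildN, h]

theorem pvRender_opt (toks : List (Bool × List Char)) (s : List Char) :
    pvRender (toks ++ [(true, s)]) = pvRender toks ++ (pvRender toks).map (fun v => v ++ s) := by
  unfold pvRender
  have hnum : pvNumOpts (toks ++ [(true, s)]) = pvNumOpts toks + 1 := by simp [pvNumOpts]
  rw [hnum]
  have hsplit : (2 : Nat) ^ (pvNumOpts toks + 1) = 2 ^ pvNumOpts toks + 2 ^ pvNumOpts toks := by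
    ring
  rw [hsplit, List.range_add, List.map_append, List.map_map, List.map_map]
  congr 1
  · apply List.map_congr_left
    intro n hn
    have hn' : n < 2 ^ pvNumOpts toks := List.mem_range.mp hn
    simp only [Function.comp, List.foldl_append, List.foldl_cons, List.foldl_nil]
    have hm : (toks.foldl pvBuildN ([], n)).2 = 0 := by
      rw [pvBuild_snd]
      exact Nat.div_eq_of_lt hn'
    rcases h : toks.foldl pvBuildN ([], n) with ⟨p, m⟩
    rw [h] at hm
    simp only at hm
    simp [pvBuildN, hm]
  · apply List.map_congr_left
    intro n hn
    have hn' : n < 2 ^ pvNumOpts toks := List.mem_range.mp hn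
    simp only [Function.comp, List.foldl_append, List.foldl_cons, List.foldl_nil]
    have hm : (toks.foldl pvBuildN ([], 2 ^ pvNumOpts toks + n)).2 = 1 := by
      rw [pvBuild_snd, Nat.add_div_left n (by positivity), Nat.div_eq_of_lt hn']
    have hfst := pvBuild_high_bit toks n hn'
    rcases h : toks.foldl pvBuildN ([], 2 ^ pvNumOpts toks + n) with ⟨p, m⟩
    rw [h] at hm hfst
    simp only at hm hfst
    simp [pvBuildN, hm, hfst]

theorem pvRender_nil : pvRender [] = [[]] := by rfl

theorem pvMain (cs : List Char) (inside : Bool) (cur : List Char) (toks : List (Bool × List Char)) :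
    cs.foldl pvStepA (inside, cur, pvRender toks) =
      ((cs.foldl pvTokStep (inside, cur, toks)).1,
       (cs.foldl pvTokStep (inside, cur, toks)).2.1,
       pvRender (cs.foldl pvTokStep (inside, cur, toks)).2.2) := by
  induction cs generalizing inside cur toks with
  | nil => rfl
  | cons c rest ih =>
      simp only [List.foldl_cons, pvStepA, pvTokStep]
      by_cases h1 : c = '('
      · simp only [if_pos h1]; exact ih true cur toks
      · simp only [if_neg h1]
        by_cases h2 : c = ')'
        · simp only [if_pos h2]
          rw [← pvRender_opt]
          exact ih false [] (toks ++ [(true, cur)])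
        · simp only [if_neg h2]
          cases inside with
          | true => simpa using ih true (cur ++ [c]) toks
          | false =>
              simp only [Bool.false_eq_true]
              rw [← pvRender_fixed]
              exact ih false cur (toks ++ [(false, [c])])

theorem pvAlt_eq_render (st : String) :
    parse_string_alt st =
      (pvRender (st.toList.foldl pvTokStep (false, [], [])).2.2).map (fun v => String.ofList v) := by
  show (PySem.List.pyRange 0 ((2 : Int) ^ ((((st.toList.foldl pvTokStep (false, [], [])).2.2).filter (fun t => t.1)).length)) 1).map
      (fun n => String.ofList (((st.toList.foldl pvTokStep (false, [], [])).2.2).foldl pvBuildStep ([], n)).1)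
    = (pvRender (st.toList.foldl pvTokStep (false, [], [])).2.2).map (fun v => String.ofList v)
  generalize (st.toList.foldl pvTokStep (false, [], [])).2.2 = toks
  unfold pvRender pvNumOpts
  rw [PySem.List.pyRange_one, List.map_map, List.map_map]
  have hpow : (((2 : Int) ^ ((toks.filter (fun t => t.1)).length) - 0)).toNat
      = 2 ^ (toks.filter (fun t => t.1)).length := by
    rw [Int.sub_zero,
        show ((2 : Int) ^ ((toks.filter (fun t => t.1)).length))
          = (((2 ^ ((toks.filter (fun t => t.1)).length) : Nat)) : Int) by push_cast; ring]
    exact Int.toNat_natCast _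
  rw [hpow]
  apply List.map_congr_left
  intro n _
  simp only [Function.comp]
  rw [show (0 : Int) + (n : Int) = (n : Int) by ring, pvBuild_cast]

-- ===== VERDICT (by name: the statement is the Claim_ definition above) =====
theorem parse_string_spec : Claim_equal_parse_string := by
  intro st _
  unfold Spec_parse_string
  rw [pvAlt_eq_render]
  unfold parse_string
  rw [← pvRender_nil, pvMain]
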